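-- pv_equiv track=rewrite | github.com/Airyshtoteles/learnLeetCode | Day14/Part4/bfs_optimized.py | _portals_for_phase
-- ===== SOURCE A (Python) =====
-- from typing import List, Tuple, Optional, Set
--
-- Pos = Tuple[int, int]
--
-- def _portals_for_phase(empties: List[Pos], pcount: int, phase: int) -> List[Pos]:
--     if pcount <= 0 or not empties:
--         return []
--     m = len(empties)
--     sel = []
--     for k in range(pcount):
--         sel.append(empties[(phase + k) % m])
--     sel.sort()
--     return sel
-- ===== SOURCE B (Python) =====
-- from typing import List, Tuple
--
-- Pos = Tuple[int, int]
--
-- def _portals_for_phase(empties: List[Pos], pcount: int, phase: int) -> List[Pos]: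
--     if pcount <= 0 or not empties:
--         return []
--     m = len(empties)
--     q, r = divmod(pcount, m)
--     start = phase % m
--     out = []
--     for j, pos in sorted(enumerate(empties), key=lambda jp: jp[1]):
--         c = q + (1 if (j - start) % m < r else 0)
--         out.extend([pos] * c)
--     return out
-- ===== Notes on version B (the rewrite author's own statement) =====
-- stated objective: faster
-- what changed: B never builds or sorts the pcount-element selection: it computes q, r = divmod(pcount, m), sorts only the m (index, position) pairs of enumerate(empties), and emits each position q times plus one extra when its index lies in the r-wide wrap window starting at phase % m.
import Mathlib
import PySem

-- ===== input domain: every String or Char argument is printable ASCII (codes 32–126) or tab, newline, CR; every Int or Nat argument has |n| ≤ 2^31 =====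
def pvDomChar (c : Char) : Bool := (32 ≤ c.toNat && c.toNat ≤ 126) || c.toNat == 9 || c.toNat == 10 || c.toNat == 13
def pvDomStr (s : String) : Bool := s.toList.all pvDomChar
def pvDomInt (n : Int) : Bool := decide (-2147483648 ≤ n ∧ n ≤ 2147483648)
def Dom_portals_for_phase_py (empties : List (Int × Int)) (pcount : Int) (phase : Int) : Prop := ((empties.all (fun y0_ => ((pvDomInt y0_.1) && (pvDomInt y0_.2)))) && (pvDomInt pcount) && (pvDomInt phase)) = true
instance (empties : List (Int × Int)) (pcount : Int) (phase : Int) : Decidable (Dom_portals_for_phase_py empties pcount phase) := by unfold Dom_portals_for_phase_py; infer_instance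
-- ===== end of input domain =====

-- B replaces A's "select pcount elements by modular indexing, then sort pcount items" with a
-- per-index count: each index j is hit q = pcount//m times plus one extra inside the r-wide wrap
-- window, so B sorts only the m (index, position) pairs and emits each position with its count.

-- ===== PORT A =====
-- literal transliteration of A: loop k in range(pcount), append empties[(phase+k) % m], then sort
def portals_for_phase_py (empties : List (Int × Int)) (pcount : Int) (phase : Int) : List (Int × Int) :=
  if pcount ≤ 0 ∨ empties = [] then []
  else
    let m : Int := (empties.length : Int)
    let sel := (PySem.List.pyRange 0 pcount 1).foldl
      (fun acc k => acc ++ [PySem.List.pyGetD empties (PySem.Int.mod (phase + k) m) (0, 0)]) []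
    PySem.List.sorted2 sel Prod.fst Prod.snd false

-- ===== PORT B =====
-- literal transliteration of B: q, r = divmod(pcount, m); sort enumerate(empties) by position;
-- emit each position q times plus once more when its index falls in the r-wide window from phase % m
def portals_for_phase_py_alt (empties : List (Int × Int)) (pcount : Int) (phase : Int) : List (Int × Int) :=
  if pcount ≤ 0 ∨ empties = [] then []
  else
    let m : Int := (empties.length : Int)
    let q := PySem.Int.floordiv pcount m
    let r := PySem.Int.mod pcount m
    let start := PySem.Int.mod phase m
    (PySem.List.sorted2 (PySem.List.enumerate empties 0) (fun jp => jp.2.1) (fun jp => jp.2.2) false).foldl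
      (fun out jp =>
        let c := q + (if PySem.Int.mod (jp.1 - start) m < r then 1 else 0)
        out ++ PySem.List.pyRepeat [jp.2] c) []

-- ===== PRECONDITION & SPEC =====
def Spec_portals_for_phase_py (empties : List (Int × Int)) (pcount : Int) (phase : Int) (out : List (Int × Int)) : Prop := out = portals_for_phase_py_alt empties pcount phase
instance (empties : List (Int × Int)) (pcount : Int) (phase : Int) (out : List (Int × Int)) : Decidable (Spec_portals_for_phase_py empties pcount phase out) := by unfold Spec_portals_for_phase_py; infer_instance

-- ===== CLAIM (what is proved, stated in full; the proofs are below) =====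
def Claim_equal_portals_for_phase_py : Prop := ∀ (empties : List (Int × Int)) (pcount : Int) (phase : Int), Dom_portals_for_phase_py empties pcount phase → Spec_portals_for_phase_py empties pcount phase (portals_for_phase_py empties pcount phase)

-- ===== LEMMAS AND PROOFS =====

-- the strict lexicographic order on Int × Int that sorted2 with keys (fst, snd) uses
def pvBef (a b : Int × Int) : Bool :=
  decide (a.1 < b.1) || (!decide (b.1 < a.1) && decide (a.2 < b.2))

theorem pvBef_antisymm {a b : Int × Int} (h1 : pvBef a b = false) (h2 : pvBef b a = false) : a = b := by
  simp [pvBef] at h1 h2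
  obtain ⟨x1, y1⟩ := a; obtain ⟨x2, y2⟩ := b
  simp_all
  omega

theorem pvBef_trans {a b c : Int × Int} (h1 : pvBef a b = true) (h2 : pvBef b c = true) : pvBef a c = true := by
  simp [pvBef] at *
  omega

theorem pvBef_irrefl (a : Int × Int) : pvBef a a = false := by
  simp [pvBef]

-- generic: insertion by the key-image of pvBef preserves "no later element is before an earlier one"
theorem pv_insertBy_pairwiseK {β : Type} (f : β → Int × Int) (x : β) (ys : List β)
    (h : ys.Pairwise (fun a b => pvBef (f b) (f a) = false)) :
    (PySem.List.insertBy (fun a b => pvBef (f a) (f b)) x ys).Pairwise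
      (fun a b => pvBef (f b) (f a) = false) := by
  induction ys with
  | nil => simp [PySem.List.insertBy]
  | cons y ys ih =>
    rw [List.pairwise_cons] at h
    obtain ⟨hy, hys⟩ := h
    by_cases hb : pvBef (f x) (f y) = true
    · have : PySem.List.insertBy (fun a b => pvBef (f a) (f b)) x (y :: ys) = x :: y :: ys := by
        simp [PySem.List.insertBy, hb]
      rw [this, List.pairwise_cons]
      refine ⟨?_, by rw [List.pairwise_cons]; exact ⟨hy, hys⟩⟩
      intro z hz
      rcases List.mem_cons.mp hz with rfl | hz
      · by_cases hyx : pvBef (f z) (f x) = true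
        · have := pvBef_trans hb hyx
          rw [pvBef_irrefl] at this; exact absurd this (by simp)
        · simpa using hyx
      · by_cases hzx : pvBef (f z) (f x) = true
        · have := pvBef_trans hzx hb
          rw [hy z hz] at this; exact absurd this (by simp)
        · simpa using hzx
    · have hbf : pvBef (f x) (f y) = false := by simpa using hb
      have : PySem.List.insertBy (fun a b => pvBef (f a) (f b)) x (y :: ys) =
          y :: PySem.List.insertBy (fun a b => pvBef (f a) (f b)) x ys := by
        simp [PySem.List.insertBy, hbf]
      rw [this, List.pairwise_cons]
      refine ⟨?_, ih hys⟩
      intro z hz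
      rw [PySem.List.insertBy_mem_iff] at hz
      rcases hz with rfl | hz
      · exact hbf
      · exact hy z hz

theorem pv_foldl_pairwiseK {β : Type} (f : β → Int × Int) (xs acc : List β)
    (h : acc.Pairwise (fun a b => pvBef (f b) (f a) = false)) :
    (xs.foldl (fun acc x => PySem.List.insertBy (fun a b => pvBef (f a) (f b)) x acc) acc).Pairwise
      (fun a b => pvBef (f b) (f a) = false) := by
  induction xs generalizing acc with
  | nil => simpa
  | cons x xs ih => exact ih _ (pv_insertBy_pairwiseK f x acc h)

theorem pv_sorted2_pairwise (xs : List (Int × Int)) :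
    (PySem.List.sorted2 xs Prod.fst Prod.snd false).Pairwise (fun a b => pvBef b a = false) := by
  have h : PySem.List.sorted2 xs Prod.fst Prod.snd false =
      xs.foldl (fun acc x => PySem.List.insertBy (fun a b => pvBef a b) x acc) [] := rfl
  rw [h]
  exact pv_foldl_pairwiseK id xs [] (by simp)

theorem pv_sorted2P_pairwise (xs : List (Int × (Int × Int))) :
    (PySem.List.sorted2 xs (fun jp => jp.2.1) (fun jp => jp.2.2) false).Pairwise
      (fun a b => pvBef b.2 a.2 = false) := by
  have h : PySem.List.sorted2 xs (fun jp => jp.2.1) (fun jp => jp.2.2) false =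
      xs.foldl (fun acc x => PySem.List.insertBy (fun a b => pvBef a.2 b.2) x acc) [] := rfl
  rw [h]
  exact pv_foldl_pairwiseK (fun jp => jp.2) xs [] (by simp)

-- pyRange 0 n 1 for a nonnegative Int n is just the casts of range n.toNat
theorem pv_pyRange01 (n : Int) (hn : 0 ≤ n) :
    PySem.List.pyRange 0 n 1 = (List.range n.toNat).map Int.ofNat := by
  simp [PySem.List.pyRange]
  rcases lt_or_ge 0 n with h | h
  · simp [h]
  · have : n = 0 := le_antisymm h hn
    subst this
    simp

theorem pv_flatMap_singleton {α β : Type} (f : α → β) (l : List α) :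
    l.flatMap (fun a => [f a]) = l.map f := by
  induction l with
  | nil => rfl
  | cons x xs ih => simp [List.flatMap_cons, ih]

-- modular-index bridge: the Int index A computes is the cast of a Nat index below M
theorem pv_mod_bridge (M : Nat) (hM : 0 < M) (x : Int) (i : Nat) :
    PySem.Int.mod (x + (i : Int)) (M : Int) =
      (((PySem.Int.mod x (M : Int)).toNat + i) % M : Nat) := by
  have hMi : (0:Int) < (M:Int) := by exact_mod_cast hM
  rw [PySem.Int.mod_eq_emod_of_pos hMi, PySem.Int.mod_eq_emod_of_pos hMi]
  push_cast
  rw [Int.toNat_of_nonneg (Int.emod_nonneg _ (by omega))]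
  rw [Int.emod_add_emod]

-- one full cycle of modular reads is a rotation of the list
theorem pv_cycle (l : List (Int × Int)) (d : Int × Int) (t : Nat) (ht : t < l.length) :
    (List.range l.length).map (fun i => l.getD ((t + i) % l.length) d) =
      l.drop t ++ l.take t := by
  apply List.ext_getElem
  · simp; omega
  · intro i h1 h2
    simp only [List.getElem_map, List.getElem_range]
    simp only [List.length_map, List.length_range] at h1
    by_cases hi : i < l.length - t
    · rw [List.getElem_append_left (by simpa using hi)]
      rw [List.getElem_drop]
      rw [Nat.mod_eq_of_lt (by omega)]
      exact List.getD_eq_getElem l d (by omega)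
    · rw [List.getElem_append_right (by simpa using hi)]
      simp only [List.getElem_take, List.length_drop]
      have hidx : (t + i) % l.length = i - (l.length - t) := by
        rw [Nat.mod_eq_sub_mod (by omega), Nat.mod_eq_of_lt (by omega)]
        omega
      rw [hidx]
      exact List.getD_eq_getElem l d (by omega)

-- q*M + r modular reads are a permutation of q copies of the list plus the first r reads
theorem pv_perm_main (l : List (Int × Int)) (d : Int × Int) (t : Nat) (ht : t < l.length)
    (q r : Nat) :
    ((List.range (q * l.length + r)).map (fun i => l.getD ((t + i) % l.length) d)).Perm
      ((List.replicate q l).flatten ++ (List.range r).map (fun i => l.getD ((t + i) % l.length) d)) := by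
  have hM : 0 < l.length := by omega
  induction q with
  | zero => simp
  | succ q ih =>
    have hsplit : (q+1) * l.length + r = (q * l.length + r) + l.length := by ring
    rw [hsplit, List.range_add, List.map_append, List.map_map]
    set a := q * l.length + r with ha
    have hblock : (List.range l.length).map ((fun i => l.getD ((t + i) % l.length) d) ∘ (fun j => a + j)) =
        l.drop ((t + a) % l.length) ++ l.take ((t + a) % l.length) := by
      rw [← pv_cycle l d ((t + a) % l.length) (Nat.mod_lt _ hM)]
      apply List.map_congr_left
      intro j hj
      simp only [Function.comp_apply]
      congr 1
      conv_rhs => rw [Nat.mod_add_mod]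
      congr 1
      omega
    rw [hblock]
    have hrot : (l.drop ((t + a) % l.length) ++ l.take ((t + a) % l.length)).Perm l := by
      refine List.perm_append_comm.trans ?_
      rw [List.take_append_drop]
    have hfin : l ++ ((List.replicate q l).flatten ++ (List.range r).map (fun i => l.getD ((t + i) % l.length) d)) =
        (List.replicate (q+1) l).flatten ++ (List.range r).map (fun i => l.getD ((t + i) % l.length) d) := by
      simp [List.replicate_succ, List.append_assoc]
    exact ((ih.append (List.Perm.refl _)).trans List.perm_append_comm).trans
      ((hrot.append_right _).trans (List.Perm.of_eq hfin))

-- emitting each element n times is, up to permutation, n whole copies of the list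
theorem pv_flatMap_replicate_perm {β : Type} (n : Nat) (l : List β) :
    (l.flatMap fun x => List.replicate n x).Perm (List.replicate n l).flatten := by
  induction n with
  | zero => simp
  | succ n ih =>
    have h1 : (l.flatMap fun x => List.replicate (n+1) x) =
        l.flatMap fun x => [x] ++ List.replicate n x := by
      simp [List.replicate_succ]
    rw [h1]
    refine (List.flatMap_append_perm l _ _).symm.trans ?_
    have h2 : (l.flatMap fun x => [x]) = l := by
      induction l with
      | nil => rfl
      | cons y ys ihy => simp [List.flatMap_cons]
    rw [h2]
    exact (ih.append_left l).trans (List.Perm.of_eq (by simp [List.replicate_succ]))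

-- 0/1 replication is a filter
theorem pv_flatMap_ite {α β : Type} (P : α → Prop) [DecidablePred P] (v : α → β) (l : List α) :
    (l.flatMap fun x => if P x then [v x] else []) = (l.filter (fun x => decide (P x))).map v := by
  induction l with
  | nil => rfl
  | cons x xs ih =>
    by_cases h : P x <;> simp [List.flatMap_cons, h, ih]

-- the window indices {(t+i) % M : i < r} are exactly {j < M : (j + M - t) % M < r}
theorem pv_window_perm (M t r : Nat) (hM : 0 < M) (ht : t < M) (hr : r < M) :
    ((List.range M).filter (fun j => decide ((j + M - t) % M < r))).Perm
      ((List.range r).map (fun i => (t + i) % M)) := by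
  rw [List.perm_ext_iff_of_nodup]
  · intro x
    simp only [List.mem_filter, List.mem_range, List.mem_map, decide_eq_true_eq]
    constructor
    · rintro ⟨hx, hcond⟩
      refine ⟨(x + M - t) % M, hcond, ?_⟩
      by_cases hxt : t ≤ x
      · have h1 : (x + M - t) % M = x - t := by
          rw [Nat.mod_eq_sub_mod (by omega), Nat.mod_eq_of_lt (by omega)]
          omega
        rw [h1, Nat.mod_eq_of_lt (by omega)]
        omega
      · have h1 : (x + M - t) % M = x + M - t := Nat.mod_eq_of_lt (by omega)
        rw [h1, Nat.mod_eq_sub_mod (by omega), Nat.mod_eq_of_lt (by omega)]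
        omega
    · rintro ⟨i, hi, rfl⟩
      constructor
      · exact Nat.mod_lt _ hM
      · by_cases hti : t + i < M
        · have h1 : (t + i) % M = t + i := Nat.mod_eq_of_lt hti
          rw [h1]
          have h2 : (t + i + M - t) % M = i := by
            have e : t + i + M - t = i + M := by omega
            rw [e, Nat.add_mod_right, Nat.mod_eq_of_lt (by omega)]
          rw [h2]; exact hi
        · have h1 : (t + i) % M = t + i - M := by
            rw [Nat.mod_eq_sub_mod (by omega), Nat.mod_eq_of_lt (by omega)]
          rw [h1]
          have h2 : (t + i - M + M - t) % M = i := by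
            have e : t + i - M + M - t = i := by omega
            rw [e, Nat.mod_eq_of_lt (by omega)]
          rw [h2]; exact hi
  · exact List.Nodup.filter _ List.nodup_range
  · refine List.Nodup.map_on ?_ List.nodup_range
    intro i hi j hj hij
    simp only [List.mem_range] at hi hj
    have h1 : (t + i) ≡ (t + j) [MOD M] := by
      unfold Nat.ModEq; omega
    have h2 : i ≡ j [MOD M] := Nat.ModEq.add_left_cancel' t h1
    have h3 : i % M = j % M := h2
    rw [Nat.mod_eq_of_lt (by omega), Nat.mod_eq_of_lt (by omega)] at h3
    exact h3

-- sorted pairs emitted blockwise stay sorted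
theorem pv_flatMap_sorted (l : List (Int × (Int × Int))) (n : Int × (Int × Int) → Nat)
    (h : l.Pairwise (fun a b => pvBef b.2 a.2 = false)) :
    ((l.flatMap fun p => List.replicate (n p) p.2).Pairwise (fun a b => pvBef b a = false)) := by
  induction l with
  | nil => simp
  | cons p l ih =>
    rw [List.pairwise_cons] at h
    obtain ⟨hp, hl⟩ := h
    rw [List.flatMap_cons, List.pairwise_append]
    refine ⟨?_, ih hl, ?_⟩
    · exact List.pairwise_replicate.mpr (Or.inr (pvBef_irrefl p.2))
    · intro a ha b hb
      rw [List.eq_of_mem_replicate ha]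
      rw [List.mem_flatMap] at hb
      obtain ⟨p', hp', hbp'⟩ := hb
      rw [List.eq_of_mem_replicate hbp']
      exact hp p' hp'

-- ===== VERDICT (by name: the statement is the Claim_ definition above) =====
theorem portals_for_phase_py_spec : Claim_equal_portals_for_phase_py := by
  intro empties pcount phase _
  unfold Spec_portals_for_phase_py portals_for_phase_py portals_for_phase_py_alt
  by_cases hg : pcount ≤ 0 ∨ empties = []
  · rw [if_pos hg, if_pos hg]
  · rw [if_neg hg, if_neg hg]
    dsimp only
    have hp : 0 < pcount := by
      rcases lt_or_ge 0 pcount with h | h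
      · exact h
      · exact absurd (Or.inl (by omega)) hg
    have he : empties ≠ [] := fun h => hg (Or.inr h)
    have hM : 0 < empties.length := List.length_pos_iff.mpr he
    have hMi : (0:Int) < (empties.length : Int) := by exact_mod_cast hM
    set M := empties.length with hMdef
    set t : Nat := (PySem.Int.mod phase (M:Int)).toNat with htdef
    have ht : t < M := by
      have h1 := PySem.Int.mod_nonneg phase hMi
      have h2 := PySem.Int.mod_lt phase hMi
      omega
    set q' : Nat := (PySem.Int.floordiv pcount (M:Int)).toNat with hq'def
    set r' : Nat := (PySem.Int.mod pcount (M:Int)).toNat with hr'def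
    have hr'nn := PySem.Int.mod_nonneg pcount hMi
    have hr' : r' < M := by
      have h2 := PySem.Int.mod_lt pcount hMi
      omega
    have hq0 : 0 ≤ PySem.Int.floordiv pcount (M:Int) := by
      have h1 := PySem.Int.floordiv_mul_add_mod pcount (M:Int)
      have h2 := PySem.Int.mod_lt pcount hMi
      nlinarith
    have hstart : PySem.Int.mod phase (M:Int) = (t:Int) :=
      (Int.toNat_of_nonneg (PySem.Int.mod_nonneg phase hMi)).symm
    have hrr : PySem.Int.mod pcount (M:Int) = (r':Int) :=
      (Int.toNat_of_nonneg hr'nn).symm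
    -- A's selection list as a Nat-indexed map
    have hA : (PySem.List.pyRange 0 pcount 1).foldl
        (fun acc k => acc ++ [PySem.List.pyGetD empties (PySem.Int.mod (phase + k) (M:Int)) (0, 0)]) [] =
        (List.range pcount.toNat).map (fun i => empties.getD ((t + i) % M) (0, 0)) := by
      rw [PySem.List.foldl_append_eq_flatMap (fun k => [PySem.List.pyGetD empties (PySem.Int.mod (phase + k) (M:Int)) (0, 0)])]
      rw [List.nil_append, pv_flatMap_singleton, pv_pyRange01 pcount (by omega), List.map_map]
      apply List.map_congr_left
      intro i _
      simp only [Function.comp_apply, Int.ofNat_eq_natCast]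
      rw [pv_mod_bridge M hM phase i, PySem.List.pyGetD_natCast]
    rw [hA]
    set selN := (List.range pcount.toNat).map (fun i => empties.getD ((t + i) % M) (0, 0)) with hselN
    -- B's fold as a flatMap of replicated blocks over the sorted pairs
    have hB : (PySem.List.sorted2 (PySem.List.enumerate empties 0) (fun jp => jp.2.1) (fun jp => jp.2.2) false).foldl
        (fun out jp =>
          out ++ PySem.List.pyRepeat [jp.2]
            (PySem.Int.floordiv pcount (M:Int) +
              (if PySem.Int.mod (jp.1 - PySem.Int.mod phase (M:Int)) (M:Int) < PySem.Int.mod pcount (M:Int) then 1 else 0))) [] =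
        (PySem.List.sorted2 (PySem.List.enumerate empties 0) (fun jp => jp.2.1) (fun jp => jp.2.2) false).flatMap
          (fun jp => List.replicate
            (q' + (if PySem.Int.mod (jp.1 - PySem.Int.mod phase (M:Int)) (M:Int) < PySem.Int.mod pcount (M:Int) then 1 else 0))
            jp.2) := by
      rw [PySem.List.foldl_append_eq_flatMap (fun jp : Int × (Int × Int) => PySem.List.pyRepeat [jp.2]
            (PySem.Int.floordiv pcount (M:Int) +
              (if PySem.Int.mod (jp.1 - PySem.Int.mod phase (M:Int)) (M:Int) < PySem.Int.mod pcount (M:Int) then 1 else 0)))]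
      rw [List.nil_append]
      apply List.flatMap_congr
      intro jp _
      rw [PySem.List.pyRepeat_singleton]
      congr 1
      by_cases hc : PySem.Int.mod (jp.1 - PySem.Int.mod phase (M:Int)) (M:Int) < PySem.Int.mod pcount (M:Int)
      · simp only [if_pos hc]; omega
      · simp only [if_neg hc]; omega
    show PySem.List.sorted2 selN Prod.fst Prod.snd false = _
    rw [hB]
    set G := fun jp : Int × (Int × Int) => List.replicate
        (q' + (if PySem.Int.mod (jp.1 - PySem.Int.mod phase (M:Int)) (M:Int) < PySem.Int.mod pcount (M:Int) then 1 else 0))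
        jp.2 with hG
    -- B's flatMap over the UNSORTED enumerate, split into the q'-part and the window part
    have hGsplit : G = fun jp => List.replicate q' jp.2 ++
        List.replicate (if PySem.Int.mod (jp.1 - PySem.Int.mod phase (M:Int)) (M:Int) < PySem.Int.mod pcount (M:Int) then 1 else 0) jp.2 := by
      funext jp
      rw [hG, ← List.replicate_add]
    have hpart1 : ((PySem.List.enumerate empties 0).flatMap (fun jp => List.replicate q' jp.2)).Perm
        (List.replicate q' empties).flatten := by
      have h1 : (PySem.List.enumerate empties 0).flatMap (fun jp => List.replicate q' jp.2) =
          ((PySem.List.enumerate empties 0).map (fun jp => jp.2)).flatMap (fun x => List.replicate q' x) := by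
        rw [List.flatMap_map]
      rw [h1, PySem.List.map_snd_enumerate]
      exact pv_flatMap_replicate_perm q' empties
    have hpart2 : ((PySem.List.enumerate empties 0).flatMap (fun jp => List.replicate
          (if PySem.Int.mod (jp.1 - PySem.Int.mod phase (M:Int)) (M:Int) < PySem.Int.mod pcount (M:Int) then 1 else 0) jp.2)).Perm
        ((List.range r').map (fun i => empties.getD ((t + i) % M) (0, 0))) := by
      have h1 : (fun jp : Int × (Int × Int) => List.replicate
            (if PySem.Int.mod (jp.1 - PySem.Int.mod phase (M:Int)) (M:Int) < PySem.Int.mod pcount (M:Int) then 1 else 0) jp.2) =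
          fun jp => if PySem.Int.mod (jp.1 - PySem.Int.mod phase (M:Int)) (M:Int) < PySem.Int.mod pcount (M:Int) then [jp.2] else [] := by
        funext jp
        split_ifs <;> simp
      rw [h1, pv_flatMap_ite (fun jp : Int × (Int × Int) => PySem.Int.mod (jp.1 - PySem.Int.mod phase (M:Int)) (M:Int) < PySem.Int.mod pcount (M:Int)) (fun jp => jp.2)]
      rw [PySem.List.enumerate_eq_map_pyRange empties ((0:Int), (0:Int)), List.filter_map, List.map_map]
      rw [show PySem.List.len empties = ((M:Nat):Int) from rfl]
      rw [pv_pyRange01 ((M:Nat):Int) (by omega), Int.toNat_natCast, List.filter_map, List.map_map]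
      have h2 : (List.range M).filter
            (((fun jp : Int × (Int × Int) => decide (PySem.Int.mod (jp.1 - PySem.Int.mod phase (M:Int)) (M:Int) < PySem.Int.mod pcount (M:Int))) ∘
              (fun j : Int => (j, PySem.List.pyGetD empties j (0, 0)))) ∘ Int.ofNat) =
          (List.range M).filter (fun j => decide ((j + M - t) % M < r')) := by
        apply List.filter_congr
        intro jn hjn
        rw [List.mem_range] at hjn
        simp only [Function.comp_apply, decide_eq_decide]
        rw [hstart, hrr, PySem.Int.mod_eq_emod_of_pos hMi]
        simp only [Int.ofNat_eq_natCast]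
        rw [show (jn:Int) - (t:Int) = ((jn + M - t : Nat) : Int) + (M:Int) * (-1) from by omega]
        rw [Int.add_mul_emod_self_left, ← Int.natCast_mod]
        constructor <;> intro h <;> exact_mod_cast h
      rw [h2]
      have h3 : ∀ jn ∈ (List.range M).filter (fun j => decide ((j + M - t) % M < r')),
          (((fun jp : Int × (Int × Int) => jp.2) ∘ (fun j : Int => (j, PySem.List.pyGetD empties j (0, 0)))) ∘ Int.ofNat) jn =
          empties.getD jn (0, 0) := by
        intro jn _
        simp only [Function.comp_apply, Int.ofNat_eq_natCast]
        rw [PySem.List.pyGetD_natCast]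
      rw [List.map_congr_left h3]
      exact ((pv_window_perm M t r' hM ht hr').map (fun j => empties.getD j (0, 0))).trans
        (List.Perm.of_eq (by rw [List.map_map]; rfl))
    -- assemble the permutation B ~ selN
    have hqr : pcount.toNat = q' * M + r' := by
      have h1 := PySem.Int.floordiv_mul_add_mod pcount (M:Int)
      have h2 := PySem.Int.mod_lt pcount hMi
      have h4 : PySem.Int.floordiv pcount (M:Int) = (q' : Int) := (Int.toNat_of_nonneg hq0).symm
      rw [h4, hrr] at h1
      omega
    have hperm : (((PySem.List.sorted2 (PySem.List.enumerate empties 0) (fun jp => jp.2.1) (fun jp => jp.2.2) false)).flatMap G).Perm selN := by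
      refine ((PySem.List.sorted2_perm _ _ _ _).flatMap (fun a _ => List.Perm.refl _)).trans ?_
      rw [hGsplit]
      refine ((List.flatMap_append_perm _ _ _).symm.trans (hpart1.append hpart2)).trans ?_
      rw [hselN, hqr]
      exact (pv_perm_main empties (0, 0) t ht q' r').symm
    -- both sides are sorted and permutations of each other, hence equal
    apply List.Perm.eq_of_pairwise
    · intro a b _ _ hab hba; exact pvBef_antisymm hba hab
    · exact pv_sorted2_pairwise selN
    · exact pv_flatMap_sorted _ _ (pv_sorted2P_pairwise (PySem.List.enumerate empties 0))
    · exact ((PySem.List.sorted2_perm selN _ _ _).trans hperm.symm)
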